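-- pv_equiv track=rewrite | github.com/i960107/algorithm | programmers/과일장수.py | solution
-- ===== SOURCE A (Python) =====
-- from typing import List
--
-- def solution(k: int, m: int, score: List[int]) -> int:
--     profit = 0
--     # 점수가 큰 것 부터 포장하는게 좋음 -> 작은 애들을 제일 적게.
--     score.sort()
--     for start in range(len(score) - 1, 0, -m):
--         end = start - m + 1
--         if end < 0:
--             break
--         profit += score[end] * m
--     return profit
-- ===== SOURCE B (Python) =====
-- from typing import List
-- from collections import Counter
--
-- def solution(k: int, m: int, score: List[int]) -> int:
--     if m <= 0:
--         return 0
--     cnt = Counter(score)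
--     profit = 0
--     seen = 0
--     for v in sorted(cnt, reverse=True):
--         prev_boxes = seen // m
--         seen += cnt[v]
--         profit += v * m * (seen // m - prev_boxes)
--     return profit
-- ===== Notes on version B (the rewrite author's own statement) =====
-- stated objective: alternative
-- what changed: B replaces A's sort of the whole list plus per-box indexing by a Counter over the scores and one pass over the distinct values sorted descending, completing boxes by floor-division arithmetic on the running count (O(n + d log d) with d distinct values instead of O(n log n)).
-- intended difference: On m == 1 with a nonempty score whose minimum is nonzero, A's range stops at index 1 and drops the smallest score (returning total minus minimum), while B returns the full total, the intended profit when every box holds one fruit. — e.g. on solution(4, 1, [3, 1, 2]): A returns 5, B returns 6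
import Mathlib
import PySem

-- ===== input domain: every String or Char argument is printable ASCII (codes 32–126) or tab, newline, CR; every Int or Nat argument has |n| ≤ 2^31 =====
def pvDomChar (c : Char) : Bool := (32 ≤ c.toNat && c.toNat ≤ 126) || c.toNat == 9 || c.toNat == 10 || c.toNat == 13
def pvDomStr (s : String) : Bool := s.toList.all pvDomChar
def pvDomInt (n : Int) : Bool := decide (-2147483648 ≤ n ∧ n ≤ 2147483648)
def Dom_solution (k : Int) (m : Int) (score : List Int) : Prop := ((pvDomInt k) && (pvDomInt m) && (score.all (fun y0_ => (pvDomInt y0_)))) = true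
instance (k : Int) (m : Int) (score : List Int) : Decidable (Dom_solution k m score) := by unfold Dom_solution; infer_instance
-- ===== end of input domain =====

-- B replaces A's full sort plus per-box indexing by a Counter over the scores and one pass over the
-- distinct values sorted descending, completing boxes by floor-division arithmetic on the running
-- count (objective: alternative); A sorts `score` in place while B does not mutate it — the
-- equivalence proved here is about the return value only.

-- ===== PORT A =====
def solution (k : Int) (m : Int) (score : List Int) : Int :=
  let s := PySem.List.sorted score (fun x => x) false
  ((PySem.List.pyRange ((s.length : Int) - 1) 0 (-m)).foldl
    (fun st start =>
      if st.2 then st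
      else if start - m + 1 < 0 then (st.1, true)
      else (st.1 + PySem.List.pyGetD s (start - m + 1) 0 * m, st.2))
    ((0 : Int), false)).1

-- ===== PORT B =====
def solution_alt (k : Int) (m : Int) (score : List Int) : Int :=
  if m ≤ 0 then 0
  else
    let cnt := PySem.Dict.counter score
    ((PySem.List.sorted cnt.keys (fun x => x) true).foldl
      (fun st v =>
        (st.1 + v * m * (PySem.Int.floordiv (st.2 + cnt.getD v 0) m - PySem.Int.floordiv st.2 m),
         st.2 + cnt.getD v 0))
      ((0 : Int), (0 : Int))).1

-- ===== PRECONDITION & SPEC =====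
-- Pre_ excludes exactly the inputs on which the Python A raises: m = 0 (range step 0 is a
-- ValueError) and m < 0 with an empty list (range(-1,0,-m) yields -1 and score[...] IndexErrors).
def Pre_solution (k : Int) (m : Int) (score : List Int) : Prop :=
  m ≠ 0 ∧ (m < 0 → score ≠ [])
instance (k : Int) (m : Int) (score : List Int) : Decidable (Pre_solution k m score) := by
  unfold Pre_solution; infer_instance
def pvWitness_solution : Int × Int × List Int := (5, 2, [1, 2, 3, 4])

-- On m = 1 with a nonempty list whose minimum is nonzero, A's range stops at index 1 and drops the
-- smallest score, returning the total minus the minimum; B returns the full total, which is the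
-- intended profit when every box holds one fruit.
def D_solution (k : Int) (m : Int) (score : List Int) : Prop :=
  m = 1 ∧ score ≠ [] ∧ score.min? ≠ some 0
instance (k : Int) (m : Int) (score : List Int) : Decidable (D_solution k m score) := by
  unfold D_solution; infer_instance

def Spec_solution (k : Int) (m : Int) (score : List Int) (out : Int) : Prop :=
  ¬ D_solution k m score → out = solution_alt k m score
instance (k : Int) (m : Int) (score : List Int) (out : Int) : Decidable (Spec_solution k m score out) := by
  unfold Spec_solution; infer_instance

def pvDiffWitness_solution : Int × Int × List Int := (4, 1, [3, 1, 2])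
def pvDiffWitnessOut_solution : Int × Int := (5, 6)

-- ===== CLAIM (what is proved, stated in full; the proofs are below) =====
def Claim_unchanged_solution : Prop := ∀ (k : Int) (m : Int) (score : List Int), Dom_solution k m score → Pre_solution k m score → Spec_solution k m score (solution k m score)
def Claim_changed_solution : Prop := Dom_solution (pvDiffWitness_solution.1) (pvDiffWitness_solution.2.1) (pvDiffWitness_solution.2.2) ∧ Pre_solution (pvDiffWitness_solution.1) (pvDiffWitness_solution.2.1) (pvDiffWitness_solution.2.2) ∧ D_solution (pvDiffWitness_solution.1) (pvDiffWitness_solution.2.1) (pvDiffWitness_solution.2.2) ∧ solution (pvDiffWitness_solution.1) (pvDiffWitness_solution.2.1) (pvDiffWitness_solution.2.2) = pvDiffWitnessOut_solution.1 ∧ solution_alt (pvDiffWitness_solution.1) (pvDiffWitness_solution.2.1) (pvDiffWitness_solution.2.2) = pvDiffWitnessOut_solution.2 ∧ pvDiffWitnessOut_solution.1 ≠ pvDiffWitnessOut_solution.2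
def Claim_exact_solution : Prop := ∀ (k : Int) (m : Int) (score : List Int), Dom_solution k m score → Pre_solution k m score → D_solution k m score → solution k m score ≠ solution_alt k m score

-- ===== LEMMAS AND PROOFS =====

-- ---- A-side: A's break-loop in closed form ----

-- the break condition of A's loop at the k-th visited index, expressed through n // m
lemma pv_break_iff (m n : Int) (hm : 0 < m) (k : Nat) :
    (n - 1 - m * (k : Int)) - m + 1 < 0 ↔ (n / m).toNat ≤ k := by
  have h := Int.le_ediv_iff_mul_le (a := (k : Int) + 1) (b := n) hm
  have hmul : ((k : Int) + 1) * m = m * (k : Int) + m := by ring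
  omega

-- A's break-loop over the first c visited indices = sum over min c (n//m) full boxes
lemma pv_foldA (s : List Int) (m n : Int) (hm : 0 < m) (c : Nat) :
    ((List.range c).map (fun (k : Nat) => n - 1 - m * (k : Int))).foldl
      (fun st start =>
        if st.2 then st
        else if start - m + 1 < 0 then (st.1, true)
        else (st.1 + PySem.List.pyGetD s (start - m + 1) 0 * m, st.2))
      ((0 : Int), false)
    = (((List.range (min c (n / m).toNat)).map
          (fun (k : Nat) => PySem.List.pyGetD s (n - ((k : Int) + 1) * m) 0 * m)).sum,
       decide ((n / m).toNat < c)) := by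
  induction c with
  | zero => simp
  | succ c ih =>
    rw [List.range_succ, List.map_append, List.foldl_append, ih]
    rcases Nat.lt_trichotomy (n / m).toNat c with h | h | h
    · have e1 : min (c + 1) (n / m).toNat = min c (n / m).toNat := by omega
      simp [h, Nat.lt_succ_of_lt h, e1]
    · have hb : (n - 1 - m * (c : Int)) - m + 1 < 0 := (pv_break_iff m n hm c).2 (by omega)
      have e1 : min (c + 1) (n / m).toNat = min c (n / m).toNat := by omega
      simp [h, hb]
    · have hb : ¬ ((n - 1 - m * (c : Int)) - m + 1 < 0) := by
        rw [pv_break_iff m n hm c]; omega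
      have e1 : min (c + 1) (n / m).toNat = c + 1 := by omega
      have e2 : min c (n / m).toNat = c := by omega
      have eidx : n - 1 - m * (c : Int) - m + 1 = n - ((c : Int) + 1) * m := by ring
      have hb2 : ¬ (n < ((c : Int) + 1) * m) := by rw [eidx] at hb; omega
      have hd : ¬ (n / m ≤ (c : Int)) := by omega
      have hf : ¬ ((n / m).toNat < c + 1) := by omega
      have hg : ¬ ((n / m).toNat < c) := by omega
      simp [hb2, hf, hg, e1, e2, List.range_succ, eidx]

-- A's descending range as an explicit map over List.range
lemma pv_pyRange_down (n m : Int) (hm : 0 < m) :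
    PySem.List.pyRange (n - 1) 0 (-m)
      = (List.range (if 1 < n then ((n + m - 2) / m).toNat else 0)).map
          (fun (k : Nat) => n - 1 - m * (k : Int)) := by
  simp only [PySem.List.pyRange]
  rw [if_neg (by omega : ¬ (-m : Int) = 0), if_neg (by omega : ¬ (0 : Int) < -m)]
  have e1 : (0 : Int) < n - 1 ↔ 1 < n := by omega
  have e2 : (n - 1 - 0 + - -m - 1) = n + m - 2 := by ring
  rw [e2]
  simp only [e1, neg_neg]
  exact List.map_congr_left (fun k _ => by ring)

-- A's value for positive m, in closed form
lemma pv_solutionA (k m : Int) (score : List Int) (hm : 0 < m) :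
    solution k m score
      = ((List.range (min
            (if 1 < ((PySem.List.sorted score (fun x => x) false).length : Int)
             then ((((PySem.List.sorted score (fun x => x) false).length : Int) + m - 2) / m).toNat
             else 0)
            ((((PySem.List.sorted score (fun x => x) false).length : Int)) / m).toNat)).map
          (fun (i : Nat) => PySem.List.pyGetD (PySem.List.sorted score (fun x => x) false)
              ((((PySem.List.sorted score (fun x => x) false).length : Int)) - ((i : Int) + 1) * m) 0 * m)).sum := by
  simp only [solution]
  rw [pv_pyRange_down _ m hm, pv_foldA _ m _ hm]

-- ---- B-side: the counter pass in the same closed form ----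

-- the j-th visited fruit (descending) completes a box iff its 1-based rank is a multiple of m
lemma pv_divstep (m a : Int) (hm : 0 < m) :
    (a + 1) / m - a / m = if (a + 1) % m = 0 then 1 else 0 := by
  have hq := Int.ediv_add_emod a m
  have hr0 : 0 ≤ a % m := Int.emod_nonneg a (by omega)
  have hr1 : a % m < m := Int.emod_lt_of_pos a hm
  by_cases hc : a % m + 1 = m
  · have hexp : (a / m + 1) * m = m * (a / m) + m := by ring
    have he : a + 1 = (a / m + 1) * m := by omega
    have h1 : (a + 1) / m = a / m + 1 := by
      rw [he, Int.mul_ediv_cancel _ (by omega : m ≠ 0)]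
    have h2 : (a + 1) % m = 0 := by
      rw [he, Int.mul_emod_left]
    simp [h1, h2]
  · have he : a + 1 = (a % m + 1) + m * (a / m) := by omega
    have h1 : (a + 1) / m = a / m := by
      rw [he, Int.add_mul_ediv_left _ _ (by omega : m ≠ 0),
        Int.ediv_eq_zero_of_lt (by omega) (by omega), zero_add]
    have h2 : (a + 1) % m = a % m + 1 := by
      rw [he, Int.add_mul_emod_self_left, Int.emod_eq_of_lt (by omega) (by omega)]
    rw [h1, h2, if_neg (by omega)]
    omega

-- one bucket of c equal values = c single steps of the per-fruit recurrence
lemma pv_bucket (m v : Int) (hm : 0 < m) (c : Nat) : ∀ (p seen : Int),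
    (List.replicate c v).foldl
        (fun (st : Int × Int) (w : Int) =>
          (st.1 + w * m * ((st.2 + 1) / m - st.2 / m), st.2 + 1)) (p, seen)
      = (p + v * m * ((seen + (c : Int)) / m - seen / m), seen + (c : Int)) := by
  induction c with
  | zero => intro p seen; simp
  | succ c ih =>
    intro p seen
    rw [List.replicate_succ, List.foldl_cons, ih]
    simp only [Prod.mk.injEq]
    exact ⟨by push_cast; ring, by push_cast; ring⟩

-- B's bucket fold over the distinct values = the per-fruit fold over the expanded list
lemma pv_expand (m : Int) (hm : 0 < m) (score : List Int) : ∀ (vals : List Int) (p seen : Int),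
    vals.foldl
        (fun (st : Int × Int) (v : Int) =>
          (st.1 + v * m * ((st.2 + ((List.count v score : Nat) : Int)) / m - st.2 / m),
           st.2 + ((List.count v score : Nat) : Int))) (p, seen)
      = (vals.flatMap (fun v => List.replicate (List.count v score) v)).foldl
          (fun (st : Int × Int) (w : Int) =>
            (st.1 + w * m * ((st.2 + 1) / m - st.2 / m), st.2 + 1)) (p, seen) := by
  intro vals
  induction vals with
  | nil => intro p seen; simp
  | cons v vals ih =>
    intro p seen
    rw [List.flatMap_cons, List.foldl_append, pv_bucket m v hm, List.foldl_cons, ih]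

-- the profit the per-fruit fold accumulates over a list, rank counted from seen+1
def pvF (m seen : Int) : List Int → Int
  | [] => 0
  | v :: t => (if (seen + 1) % m = 0 then v * m else 0) + pvF m (seen + 1) t

lemma pv_elem (m : Int) (hm : 0 < m) : ∀ (t : List Int) (p seen : Int),
    t.foldl
        (fun (st : Int × Int) (w : Int) =>
          (st.1 + w * m * ((st.2 + 1) / m - st.2 / m), st.2 + 1)) (p, seen)
      = (p + pvF m seen t, seen + (t.length : Int)) := by
  intro t
  induction t with
  | nil => intro p seen; simp [pvF]
  | cons v t ih =>
    intro p seen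
    rw [List.foldl_cons, ih, pvF, pv_divstep m seen hm]
    simp only [Prod.mk.injEq]
    constructor
    · split_ifs <;> ring
    · simp only [List.length_cons, Nat.cast_add, Nat.cast_one]; ring

lemma pvF_eq_sum (m : Int) : ∀ (t : List Int) (seen : Int),
    pvF m seen t
      = ∑ j ∈ Finset.range t.length,
          (if (seen + (j : Int) + 1) % m = 0 then t.getD j 0 * m else 0) := by
  intro t
  induction t with
  | nil => intro seen; simp [pvF]
  | cons v t ih =>
    intro seen
    rw [pvF, ih (seen + 1), List.length_cons, Finset.sum_range_succ']
    simp only [List.getD_cons_succ, List.getD_cons_zero, Nat.cast_add, Nat.cast_zero,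
      Nat.cast_one, add_zero]
    rw [add_comm]
    congr 1
    refine Finset.sum_congr rfl (fun j _ => ?_)
    have he : seen + ((j : Int) + 1) + 1 = seen + 1 + (j : Int) + 1 := by ring
    rw [he]

-- count of each value in the expansion of a duplicate-free list
lemma pv_count_flat (f : Int → Nat) : ∀ (ls : List Int), ls.Nodup → ∀ (v : Int),
    (ls.flatMap (fun u => List.replicate (f u) u)).count v = if v ∈ ls then f v else 0 := by
  intro ls
  induction ls with
  | nil => intro _ v; simp
  | cons u ls ih =>
    intro hnd v
    rw [List.flatMap_cons, List.count_append, List.count_replicate,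
      ih (List.nodup_cons.1 hnd).2 v]
    by_cases hv : v = u
    · subst hv
      simp [(List.nodup_cons.1 hnd).1]
    · simp [hv, Ne.symm hv]

-- the expansion of a strictly decreasing list is weakly decreasing
lemma pv_flat_pairwise (f : Int → Nat) : ∀ (ls : List Int), ls.Pairwise (· > ·) →
    (ls.flatMap (fun u => List.replicate (f u) u)).Pairwise (· ≥ ·) := by
  intro ls
  induction ls with
  | nil => intro _; simp
  | cons u ls ih =>
    intro hp
    rw [List.flatMap_cons]
    rcases List.pairwise_cons.1 hp with ⟨hu, htail⟩
    refine List.pairwise_append.2 ⟨List.pairwise_replicate.2 (Or.inr le_rfl), ih htail, ?_⟩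
    intro x hx y hy
    rcases List.mem_flatMap.1 hy with ⟨w, hw, hyw⟩
    rw [List.eq_of_mem_replicate hx, List.eq_of_mem_replicate hyw]
    exact le_of_lt (hu w hw)

-- the descending sort of the distinct values is the reverse of the ascending one
lemma pv_vals (score : List Int) :
    PySem.List.sorted (PySem.Set.ofList score) (fun x => x) true
      = (PySem.List.sorted (PySem.Set.ofList score) (fun x => x) false).reverse :=
  PySem.List.sorted_rev_eq_of_perm_of_pairwise_gt _ _ _
    ((List.reverse_perm _).trans (PySem.List.sorted_perm _ _ _))
    (List.pairwise_reverse.2 ((PySem.List.sorted_ofList_pairwise_lt score).imp (fun h => h)))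

-- the expansion of the descending distinct values is the reverse of the sorted score list
lemma pv_T (score : List Int) :
    ((PySem.List.sorted (PySem.Set.ofList score) (fun x => x) false).reverse.flatMap
        (fun v => List.replicate (List.count v score) v))
      = (PySem.List.sorted score (fun x => x) false).reverse := by
  have hasc : (PySem.List.sorted (PySem.Set.ofList score) (fun x => x) false).Perm
      (PySem.Set.ofList score) :=
    PySem.List.sorted_perm (PySem.Set.ofList score) (fun x => x) false
  have hnd : (PySem.List.sorted (PySem.Set.ofList score) (fun x => x) false).reverse.Nodup :=
    List.nodup_reverse.2 (hasc.nodup_iff.2 (PySem.Set.nodup_ofList score))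
  have hmem : ∀ v : Int,
      v ∈ (PySem.List.sorted (PySem.Set.ofList score) (fun x => x) false).reverse ↔ v ∈ score := by
    intro v
    rw [List.mem_reverse, PySem.List.mem_sorted, PySem.Set.mem_ofList]
  have hperm : ((PySem.List.sorted (PySem.Set.ofList score) (fun x => x) false).reverse.flatMap
      (fun v => List.replicate (List.count v score) v)).Perm
      (PySem.List.sorted score (fun x => x) false).reverse := by
    rw [List.perm_iff_count]
    intro v
    rw [pv_count_flat _ _ hnd v, List.count_reverse,
      (PySem.List.sorted_perm score (fun x => x) false).count_eq]
    by_cases hv : v ∈ score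
    · rw [if_pos ((hmem v).2 hv)]
    · rw [if_neg (fun h => hv ((hmem v).1 h)), Eq.comm, List.count_eq_zero]
      exact hv
  have hp1 : ((PySem.List.sorted (PySem.Set.ofList score) (fun x => x) false).reverse.flatMap
      (fun v => List.replicate (List.count v score) v)).Pairwise (· ≥ ·) :=
    pv_flat_pairwise _ _ (List.pairwise_reverse.2
      ((PySem.List.sorted_ofList_pairwise_lt score).imp (fun h => h)))
  have hp2 : (PySem.List.sorted score (fun x => x) false).reverse.Pairwise (· ≥ ·) :=
    List.pairwise_reverse.2 ((PySem.List.sorted_pairwise score (fun x => x)).imp (fun h => h))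
  exact PySem.List.eq_of_perm_of_pairwise_le_of_injective (fun x : Int => -x)
    (fun a b h => by dsimp only at h; omega) hperm
    (hp1.imp (fun h => by dsimp only; omega)) (hp2.imp (fun h => by dsimp only; omega))

-- index bookkeeping: sum over ranks that are multiples of M = sum over boxes
lemma pv_reindex_core (M : Nat) (hM : 0 < M) (g : Nat → Int) (n : Nat) :
    (∑ j ∈ Finset.range n, if (j + 1) % M = 0 then g j else 0)
      = ∑ i ∈ Finset.range (n / M), g ((i + 1) * M - 1) := by
  rw [← Finset.sum_filter]
  refine Finset.sum_nbij' (i := fun j => (j + 1) / M - 1) (j := fun i => (i + 1) * M - 1)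
    ?_ ?_ ?_ ?_ ?_
  · intro j hj
    rcases Finset.mem_filter.1 hj with ⟨hjr, hdvd⟩
    rw [Finset.mem_range] at hjr
    have hd : M ∣ j + 1 := Nat.dvd_of_mod_eq_zero hdvd
    have hc : (j + 1) / M * M = j + 1 := Nat.div_mul_cancel hd
    have hc1 : 1 ≤ (j + 1) / M := by
      rcases Nat.eq_zero_or_pos ((j + 1) / M) with h0 | h0
      · rw [h0] at hc; omega
      · omega
    have hle : (j + 1) / M ≤ n / M := (Nat.le_div_iff_mul_le hM).2 (by omega)
    simp only [Finset.mem_range]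
    omega
  · intro i hi
    rw [Finset.mem_range] at hi
    have hle : (i + 1) * M ≤ n := (Nat.le_div_iff_mul_le hM).1 (by omega)
    have hpos : 0 < (i + 1) * M := Nat.mul_pos (Nat.succ_pos i) hM
    simp only [Finset.mem_filter, Finset.mem_range]
    refine ⟨by omega, ?_⟩
    have he : (i + 1) * M - 1 + 1 = (i + 1) * M := by omega
    rw [he, Nat.mul_mod_left]
  · intro j hj
    rcases Finset.mem_filter.1 hj with ⟨_, hdvd⟩
    have hd : M ∣ j + 1 := Nat.dvd_of_mod_eq_zero hdvd
    have hc : (j + 1) / M * M = j + 1 := Nat.div_mul_cancel hd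
    have hc1 : 1 ≤ (j + 1) / M := by
      rcases Nat.eq_zero_or_pos ((j + 1) / M) with h0 | h0
      · rw [h0] at hc; omega
      · omega
    show ((j + 1) / M - 1 + 1) * M - 1 = j
    have he : (j + 1) / M - 1 + 1 = (j + 1) / M := by omega
    rw [he]
    omega
  · intro i hi
    rw [Finset.mem_range] at hi
    have hpos : 0 < (i + 1) * M := Nat.mul_pos (Nat.succ_pos i) hM
    show ((i + 1) * M - 1 + 1) / M - 1 = i
    have he : (i + 1) * M - 1 + 1 = (i + 1) * M := by omega
    rw [he, Nat.mul_div_cancel _ hM]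
    omega
  · intro j hj
    rcases Finset.mem_filter.1 hj with ⟨_, hdvd⟩
    have hd : M ∣ j + 1 := Nat.dvd_of_mod_eq_zero hdvd
    have hc : (j + 1) / M * M = j + 1 := Nat.div_mul_cancel hd
    have hc1 : 1 ≤ (j + 1) / M := by
      rcases Nat.eq_zero_or_pos ((j + 1) / M) with h0 | h0
      · rw [h0] at hc; omega
      · omega
    have hx : ((j + 1) / M - 1 + 1) * M - 1 = j := by
      have he : (j + 1) / M - 1 + 1 = (j + 1) / M := by omega
      rw [he]
      omega
    exact congrArg g hx.symm

-- B's value for positive m, in A's closed form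
lemma pv_solutionB (k m : Int) (score : List Int) (hm : 0 < m) :
    solution_alt k m score
      = ((List.range ((((PySem.List.sorted score (fun x => x) false).length : Int)) / m).toNat).map
          (fun (i : Nat) => PySem.List.pyGetD (PySem.List.sorted score (fun x => x) false)
              ((((PySem.List.sorted score (fun x => x) false).length : Int)) - ((i : Int) + 1) * m) 0 * m)).sum := by
  have hMm : ((m.toNat : Nat) : Int) = m := Int.toNat_of_nonneg (by omega)
  simp only [solution_alt, if_neg (show ¬ m ≤ 0 by omega)]
  simp only [PySem.Dict.getD_counter, PySem.Dict.keys_counter,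
    PySem.Int.floordiv_eq_ediv_of_pos hm]
  rw [pv_expand m hm score _ 0 0, pv_vals score, pv_T score, pv_elem m hm _ 0 0]
  dsimp only
  rw [zero_add, pvF_eq_sum m _ 0, List.length_reverse]
  have hcond : ∀ j : Nat, (((0 : Int) + (j : Int) + 1) % m = 0) ↔ ((j + 1) % m.toNat = 0) := by
    intro j
    rw [zero_add, ← hMm]
    norm_cast
  have hstep : (∑ j ∈ Finset.range (PySem.List.sorted score (fun x => x) false).length,
        if ((0 : Int) + (j : Int) + 1) % m = 0
        then (PySem.List.sorted score (fun x => x) false).reverse.getD j 0 * m else 0)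
      = ∑ j ∈ Finset.range (PySem.List.sorted score (fun x => x) false).length,
          if (j + 1) % m.toNat = 0
          then (PySem.List.sorted score (fun x => x) false).reverse.getD j 0 * m else 0 :=
    Finset.sum_congr rfl (fun j _ => if_congr (hcond j) rfl rfl)
  rw [hstep, pv_reindex_core m.toNat (by omega)
    (fun j => (PySem.List.sorted score (fun x => x) false).reverse.getD j 0 * m)
    (PySem.List.sorted score (fun x => x) false).length]
  have hdiveq : ((((PySem.List.sorted score (fun x => x) false).length : Int)) / m).toNat
      = (PySem.List.sorted score (fun x => x) false).length / m.toNat := by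
    rw [← hMm]
    norm_cast
  rw [hdiveq]
  have hfinal : (∑ i ∈ Finset.range ((PySem.List.sorted score (fun x => x) false).length / m.toNat),
        (PySem.List.sorted score (fun x => x) false).reverse.getD ((i + 1) * m.toNat - 1) 0 * m)
      = ∑ i ∈ Finset.range ((PySem.List.sorted score (fun x => x) false).length / m.toNat),
          PySem.List.pyGetD (PySem.List.sorted score (fun x => x) false)
            ((((PySem.List.sorted score (fun x => x) false).length : Int)) - ((i : Int) + 1) * m) 0 * m := by
    refine Finset.sum_congr rfl (fun i hi => ?_)
    rw [Finset.mem_range] at hi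
    have hle : (i + 1) * m.toNat ≤ (PySem.List.sorted score (fun x => x) false).length :=
      (Nat.le_div_iff_mul_le (by omega)).1 (by omega)
    have hpos : 0 < (i + 1) * m.toNat := Nat.mul_pos (Nat.succ_pos i) (by omega)
    have hidx : (((PySem.List.sorted score (fun x => x) false).length : Int)) - ((i : Int) + 1) * m
        = (((PySem.List.sorted score (fun x => x) false).length - (i + 1) * m.toNat : Nat) : Int) := by
      rw [Nat.cast_sub hle]
      push_cast [hMm]
      try ring
    rw [hidx, PySem.List.pyGetD_natCast]
    have hlen1 : (i + 1) * m.toNat - 1 < (PySem.List.sorted score (fun x => x) false).length := by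
      omega
    rw [List.getD_eq_getElem?_getD, List.getD_eq_getElem?_getD,
      List.getElem?_reverse (l := PySem.List.sorted score (fun x => x) false) hlen1]
    have hix2 : (PySem.List.sorted score (fun x => x) false).length - 1 - ((i + 1) * m.toNat - 1)
        = (PySem.List.sorted score (fun x => x) false).length - (i + 1) * m.toNat := by
      omega
    rw [hix2]
  exact hfinal

-- for m ≥ 2 the break never truncates: min cA (n//m) = n//m
lemma pv_min_eq (n m : Int) (hn : 0 ≤ n) (hm : 2 ≤ m) :
    min (if 1 < n then ((n + m - 2) / m).toNat else 0) (n / m).toNat = (n / m).toNat := by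
  by_cases h1 : 1 < n
  · rw [if_pos h1]
    have hle : n / m ≤ (n + m - 2) / m := Int.ediv_le_ediv (by omega) (by omega)
    have h0 : 0 ≤ n / m := Int.ediv_nonneg hn (by omega)
    omega
  · rw [if_neg h1]
    have : n / m = 0 := Int.ediv_eq_zero_of_lt hn (by omega)
    simp [this]
lemma pv_min_one (n : Int) (hn : 0 ≤ n) :
    min (if 1 < n then ((n + 1 - 2) / 1).toNat else 0) (n / 1).toNat = n.toNat - 1 := by
  by_cases h1 : 1 < n
  · rw [if_pos h1]; simp; omega
  · rw [if_neg h1]; simp; omega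

-- the head of the ascending sort is the Python min of the list
lemma pv_min?_sorted_head (score : List Int) (s0 : Int) (t : List Int)
    (h : PySem.List.sorted score (fun x => x) false = s0 :: t) : score.min? = some s0 := by
  rw [List.min?_eq_some_iff]
  constructor
  · have hmem : s0 ∈ PySem.List.sorted score (fun x => x) false := by
      rw [h]; exact List.mem_cons_self
    exact ((PySem.List.sorted_perm score (fun x => x) false).mem_iff).1 hmem
  · exact fun b hb => PySem.List.key_head_sorted_le score (fun x => x) h b hb

-- with m = 1, B = A + (head of sorted score)
lemma pv_one_diff (k : Int) (score : List Int) (s0 : Int) (t : List Int)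
    (h : PySem.List.sorted score (fun x => x) false = s0 :: t) :
    solution_alt k 1 score = solution k 1 score + s0 := by
  rw [pv_solutionA k 1 score (by omega), pv_solutionB k 1 score (by omega),
    pv_min_one _ (by positivity)]
  have hlen : (PySem.List.sorted score (fun x => x) false).length = t.length + 1 := by
    rw [h]; simp
  rw [hlen]
  have ec1 : (((t.length + 1 : Nat) : Int) / 1).toNat = t.length + 1 := by simp
  have ec2 : (((t.length + 1 : Nat) : Int)).toNat - 1 = t.length := by simp
  rw [ec1, ec2, List.range_succ, List.map_append, List.sum_append]
  have e2 : ((t.length + 1 : Nat) : Int) - ((t.length : Int) + 1) * 1 = 0 := by push_cast; ring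
  simp only [List.map_cons, List.map_nil, List.sum_cons, List.sum_nil, e2]
  rw [h]
  simp [PySem.List.pyGetD_zero_cons]

-- for m < 0 (nonempty list) A's range is empty
lemma pv_neg_empty (k m : Int) (score : List Int) (hm : m < 0) (hne : score ≠ []) :
    solution k m score = 0 := by
  simp only [solution]
  have hlen : 1 ≤ (PySem.List.sorted score (fun x => x) false).length := by
    have := (PySem.List.sorted_eq_nil_iff (xs := score) (key := fun x => x) (rev := false))
    cases hs : PySem.List.sorted score (fun x => x) false with
    | nil => exact absurd (this.1 hs) hne
    | cons a l => simp
  have : PySem.List.pyRange ((((PySem.List.sorted score (fun x => x) false).length : Int)) - 1) 0 (-m) = [] := by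
    rw [PySem.List.pyRange_of_pos _ _ (by omega)]
    rw [if_neg (by push_cast; omega)]
    simp
  rw [this]
  simp

-- ===== VERDICT (by name: the statement is the Claim_ definition above) =====
theorem solution_spec : Claim_unchanged_solution := by
  intro k m score _ hpre
  unfold Spec_solution
  intro hnD
  rcases hpre with ⟨hm0, hneg⟩
  rcases lt_trichotomy m 0 with hm | hm | hm
  · rw [pv_neg_empty k m score hm (hneg hm)]
    unfold solution_alt
    rw [if_pos (by omega)]
  · exact absurd hm hm0
  · by_cases hm1 : m = 1
    · subst hm1
      by_cases hsc : score = []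
      · subst hsc
        rw [pv_solutionA k 1 [] (by omega), pv_solutionB k 1 [] (by omega)]
        simp [PySem.List.sorted]
      · have hs : PySem.List.sorted score (fun x => x) false ≠ [] := by
          intro h
          exact hsc ((PySem.List.sorted_eq_nil_iff score (fun x => x) false).1 h)
        cases hsort : PySem.List.sorted score (fun x => x) false with
        | nil => exact absurd hsort hs
        | cons s0 t =>
          have hmin : score.min? = some s0 := pv_min?_sorted_head score s0 t hsort
          have h0 : s0 = 0 := by
            unfold D_solution at hnD
            push_neg at hnD
            have := hnD rfl hsc
            rw [hmin] at this
            simpa using this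
          rw [pv_one_diff k score s0 t hsort, h0, add_zero]
    · -- m ≥ 2
      rw [pv_solutionA k m score hm, pv_solutionB k m score hm,
        pv_min_eq _ m (by positivity) (by omega)]

theorem solution_changed : Claim_changed_solution := by
  unfold Claim_changed_solution; decide

theorem solution_tight : Claim_exact_solution := by
  intro k m score _ _ hD
  rcases hD with ⟨hm1, hne, hmin⟩
  subst hm1
  have hs : PySem.List.sorted score (fun x => x) false ≠ [] := by
    intro h
    exact hne ((PySem.List.sorted_eq_nil_iff score (fun x => x) false).1 h)
  cases hsort : PySem.List.sorted score (fun x => x) false with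
  | nil => exact absurd hsort hs
  | cons s0 t =>
    have hmin' : score.min? = some s0 := pv_min?_sorted_head score s0 t hsort
    have h0 : s0 ≠ 0 := by
      intro h; rw [h] at hmin'; exact hmin hmin'
    have hdiff := pv_one_diff k score s0 t hsort
    omega
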